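-- pv_equiv track=rewrite | github.com/Unicx22/unixc | src/components/discordtoken.py | calc_flags
-- ===== SOURCE A (Python) =====
-- def calc_flags(flags: int) -> list:
--     flags_dict = {
--         "DISCORD_EMPLOYEE": {
--             "emoji": "💀",
--             "shift": 0,
--             "ind": 1
--         },
--         "DISCORD_PARTNER": {
--             "emoji": "🤝",
--             "shift": 1,
--             "ind": 2
--         },
--         "HYPESQUAD_EVENTS": {
--             "emoji": "HYPESQUAD_EVENTS",
--             "shift": 2,
--             "ind": 4
--         },
--         "BUG_HUNTER_LEVEL_1": {
--             "emoji": "BUG_HUNTER",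
--             "shift": 3,
--             "ind": 4
--         },
--         "HOUSE_BRAVERY": {
--             "emoji": "HOUSE_BRAVERY",
--             "shift": 6,
--             "ind": 64
--         },
--         "HOUSE_BRILLIANCE": {
--             "emoji": "",
--             "shift": 7,
--             "ind": 128
--         },
--         "HOUSE_BALANCE": {
--             "emoji": "",
--             "shift": 8,
--             "ind": 256
--         },
--         "EARLY_SUPPORTER": {
--             "emoji": "",
--             "shift": 9,
--             "ind": 512
--         },
--         "BUG_HUNTER_LEVEL_2": {
--             "emoji": "",
--             "shift": 14,
--             "ind": 16384
--         },
--         "VERIFIED_BOT_DEVELOPER": {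
--             "emoji": "⌨️",
--             "shift": 17,
--             "ind": 131072
--         },
--         "CERTIFIED_MODERATOR": {
--             "emoji": "👮",
--             "shift": 18,
--             "ind": 262144
--         },
--         "SPAMMER": {
--             "emoji": "⌨",
--             "shift": 20,
--             "ind": 1048704
--         },
--     }
--
--     return [[flags_dict[flag]['emoji'], flags_dict[flag]['ind']] for flag in flags_dict if int(flags) & (1 << flags_dict[flag]["shift"])]
-- ===== SOURCE B (Python) =====
-- def calc_flags(flags: int) -> list:
--     index = {
--         0: ["💀", 1],
--         1: ["🤝", 2],
--         2: ["HYPESQUAD_EVENTS", 4],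
--         3: ["BUG_HUNTER", 4],
--         6: ["HOUSE_BRAVERY", 64],
--         7: ["", 128],
--         8: ["", 256],
--         9: ["", 512],
--         14: ["", 16384],
--         17: ["⌨️", 131072],
--         18: ["👮", 262144],
--         20: ["⌨", 1048704],
--     }
--     # keep only the bits the table knows about, then scan them low-to-high
--     m = int(flags) & 1459151
--     out = []
--     pos = 0
--     while m:
--         if m & 1:
--             out.append(index[pos])
--         m >>= 1
--         pos += 1
--     return out
-- ===== Notes on version B (the rewrite author's own statement) =====
-- stated objective: alternative
-- what changed: B replaces A's per-flag scan of the 12-entry flags dict (one masked test per flag) by masking flags with the table's combined bit mask once and then scanning the set bits of the masked value low-to-high against an index keyed by bit position.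
import Mathlib
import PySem

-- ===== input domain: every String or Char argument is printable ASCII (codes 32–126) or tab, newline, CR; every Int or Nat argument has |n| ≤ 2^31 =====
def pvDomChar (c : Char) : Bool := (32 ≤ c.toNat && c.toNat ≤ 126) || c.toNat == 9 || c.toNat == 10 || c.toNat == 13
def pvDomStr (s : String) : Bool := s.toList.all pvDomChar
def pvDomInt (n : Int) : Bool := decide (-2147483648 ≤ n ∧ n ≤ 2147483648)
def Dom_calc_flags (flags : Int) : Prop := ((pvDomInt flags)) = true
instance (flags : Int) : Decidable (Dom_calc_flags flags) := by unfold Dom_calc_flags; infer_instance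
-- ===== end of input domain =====

-- B replaces A's per-flag dict scan by masking `flags` with the table's bit mask and
-- scanning the set bits of the masked value low-to-high against a bit-position index
-- (objective: alternative decomposition, same exact return value).

-- ===== PORT A =====
-- A's flags_dict, in insertion order: (name, emoji, shift, ind)
def pvFlagsDictA : List (String × String × Nat × Int) :=
  [("DISCORD_EMPLOYEE", "💀", 0, 1),
   ("DISCORD_PARTNER", "🤝", 1, 2),
   ("HYPESQUAD_EVENTS", "HYPESQUAD_EVENTS", 2, 4),
   ("BUG_HUNTER_LEVEL_1", "BUG_HUNTER", 3, 4),
   ("HOUSE_BRAVERY", "HOUSE_BRAVERY", 6, 64),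
   ("HOUSE_BRILLIANCE", "", 7, 128),
   ("HOUSE_BALANCE", "", 8, 256),
   ("EARLY_SUPPORTER", "", 9, 512),
   ("BUG_HUNTER_LEVEL_2", "", 14, 16384),
   ("VERIFIED_BOT_DEVELOPER", "⌨️", 17, 131072),
   ("CERTIFIED_MODERATOR", "👮", 18, 262144),
   ("SPAMMER", "⌨", 20, 1048704)]

-- the comprehension: keep [emoji, ind] of each flag whose bit `int(flags) & (1 << shift)` is non-zero
def calc_flags (flags : Int) : List (String × Int) :=
  pvFlagsDictA.filterMap (fun x =>
    if Int.land flags ((1 <<< x.2.2.1 : Nat) : Int) ≠ 0 then some (x.2.1, x.2.2.2) else none)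

-- ===== PORT B =====
-- B's index: bit position ↦ [emoji, ind]
def pvFlagIndex : List (Nat × String × Int) :=
  [(0, "💀", 1), (1, "🤝", 2), (2, "HYPESQUAD_EVENTS", 4), (3, "BUG_HUNTER", 4),
   (6, "HOUSE_BRAVERY", 64), (7, "", 128), (8, "", 256), (9, "", 512),
   (14, "", 16384), (17, "⌨️", 131072), (18, "👮", 262144), (20, "⌨", 1048704)]

-- B's while loop: emit index[pos] for every set bit of m, low to high.
-- (the `none` branch of the lookup is unreachable: m is masked to the index's keys;
-- Python's index[pos] would raise KeyError there)
def pvScanBits (n : Nat) (pos : Nat) : List (String × Int) :=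
  if h : n = 0 then []
  else
    (if n &&& 1 = 1 then
      match pvFlagIndex.lookup pos with
      | some p => [p]
      | none => []
    else []) ++ pvScanBits (n >>> 1) (pos + 1)
termination_by n
decreasing_by
  rw [Nat.shiftRight_eq_div_pow]
  exact Nat.div_lt_self (Nat.pos_of_ne_zero h) (by norm_num)

def calc_flags_alt (flags : Int) : List (String × Int) :=
  pvScanBits (Int.land flags 1459151).toNat 0

-- ===== PRECONDITION & SPEC =====
def Spec_calc_flags (flags : Int) (out : List (String × Int)) : Prop := out = calc_flags_alt flags
instance (flags : Int) (out : List (String × Int)) : Decidable (Spec_calc_flags flags out) := by unfold Spec_calc_flags; infer_instance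

-- ===== CLAIM (what is proved, stated in full; the proofs are below) =====
def Claim_equal_calc_flags : Prop := ∀ (flags : Int), Dom_calc_flags flags → Spec_calc_flags flags (calc_flags flags)

-- ===== LEMMAS AND PROOFS =====

lemma pv_filterMap_none {α β : Type} (t : List α) : t.filterMap (fun _ => (none : Option β)) = [] := by
  induction t with
  | nil => rfl
  | cons a l ih => simpa [List.filterMap_cons] using ih

lemma pv_and_one_eq_testBit (n : Nat) : (n &&& 1 = 1) ↔ n.testBit 0 = true := by
  rw [Nat.testBit_zero, Nat.and_one_is_mod]
  simp

-- n ≠ 0 has some set bit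
lemma pv_exists_bit {n : Nat} (hn : n ≠ 0) : ∃ j, n.testBit j = true := by
  by_contra h
  push_neg at h
  refine hn (Nat.eq_of_testBit_eq fun i => ?_)
  rw [Nat.zero_testBit]
  exact Bool.eq_false_iff.mpr (h i)

-- main loop invariant: pvScanBits on a value whose bits all lie in the (sorted, ≥ k) table t
-- computes exactly the filter of t by the corresponding bits
lemma pv_scan_eq (n : Nat) : ∀ (k : Nat) (t : List (Nat × String × Int)),
    t.Pairwise (fun a b => a.1 < b.1) →
    (∀ e ∈ t, k ≤ e.1 ∧ pvFlagIndex.lookup e.1 = some e.2) →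
    (∀ j, n.testBit j = true → (k + j) ∈ t.map Prod.fst) →
    pvScanBits n k = t.filterMap (fun e => if n.testBit (e.1 - k) = true then some e.2 else none) := by
  induction n using Nat.strong_induction_on with
  | _ n IH =>
  intro k t hsort hent hmem
  by_cases hn : n = 0
  · subst hn
    rw [pvScanBits]
    simp [Nat.zero_testBit, pv_filterMap_none]
  · cases t with
    | nil =>
      obtain ⟨j, hj⟩ := pv_exists_bit hn
      simpa using hmem j hj
    | cons e rest =>
      obtain ⟨es, ep⟩ := e
      rw [pvScanBits, dif_neg hn]
      have hpair := List.pairwise_cons.mp hsort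
      have hrec : n >>> 1 < n := by
        rw [Nat.shiftRight_eq_div_pow]
        exact Nat.div_lt_self (Nat.pos_of_ne_zero hn) (by norm_num)
      have hshift : ∀ j, (n >>> 1).testBit j = n.testBit (1 + j) := fun j => Nat.testBit_shiftRight n
      have hkes : k ≤ es := (hent (es, ep) (by simp)).1
      by_cases h1 : n.testBit 0 = true
      · -- lowest bit set: the head entry must sit at position k
        have hk : k ∈ ((es, ep) :: rest).map Prod.fst := by simpa using hmem 0 h1
        have hek : es = k := by
          simp only [List.map_cons, List.mem_cons] at hk
          rcases hk with hk | hk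
          · omega
          · obtain ⟨x, hx, hx1⟩ := List.mem_map.mp hk
            have := hpair.1 x hx
            omega
        subst hek
        have hlook : pvFlagIndex.lookup es = some ep := (hent (es, ep) (by simp)).2
        rw [if_pos ((pv_and_one_eq_testBit n).mpr h1), hlook]
        have hmem' : ∀ j, (n >>> 1).testBit j = true → (es + 1 + j) ∈ rest.map Prod.fst := by
          intro j hj
          have hj' : n.testBit (1 + j) = true := by rw [← hshift j]; exact hj
          have hm := hmem (1 + j) hj'
          rw [show es + (1 + j) = es + 1 + j by omega] at hm
          simp only [List.map_cons, List.mem_cons] at hm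
          rcases hm with h | h
          · exact absurd h (by omega)
          · exact h
        have hIH := IH (n >>> 1) hrec (es + 1) rest hpair.2
          (fun e' he' => ⟨by have := hpair.1 e' he'; omega, (hent e' (by simp [he'])).2⟩)
          hmem'
        rw [hIH, List.filterMap_cons]
        simp only [Nat.sub_self, h1, if_pos rfl]
        have hcongr : rest.filterMap
              (fun e' => if (n >>> 1).testBit (e'.1 - (es + 1)) = true then some e'.2 else none)
            = rest.filterMap (fun e' => if n.testBit (e'.1 - es) = true then some e'.2 else none) := by
          apply List.filterMap_congr
          intro e' he'
          have h1' : es + 1 ≤ e'.1 := by have := hpair.1 e' he'; omega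
          rw [hshift, show 1 + (e'.1 - (es + 1)) = e'.1 - es by omega]
        rw [hcongr]
        simp
      · -- lowest bit clear
        have h1f : n.testBit 0 = false := Bool.eq_false_iff.mpr h1
        rw [if_neg (fun hc => h1 ((pv_and_one_eq_testBit n).mp hc)), List.nil_append]
        by_cases hek : es = k
        · subst hek
          have hmem' : ∀ j, (n >>> 1).testBit j = true → (es + 1 + j) ∈ rest.map Prod.fst := by
            intro j hj
            have hj' : n.testBit (1 + j) = true := by rw [← hshift j]; exact hj
            have hm := hmem (1 + j) hj'
            rw [show es + (1 + j) = es + 1 + j by omega] at hm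
            simp only [List.map_cons, List.mem_cons] at hm
            rcases hm with h | h
            · exact absurd h (by omega)
            · exact h
          have hIH := IH (n >>> 1) hrec (es + 1) rest hpair.2
            (fun e' he' => ⟨by have := hpair.1 e' he'; omega, (hent e' (by simp [he'])).2⟩)
            hmem'
          rw [hIH, List.filterMap_cons]
          simp only [Nat.sub_self, h1f]
          rw [if_neg (by simp)]
          apply List.filterMap_congr
          intro e' he'
          have h1' : es + 1 ≤ e'.1 := by have := hpair.1 e' he'; omega
          rw [hshift, show 1 + (e'.1 - (es + 1)) = e'.1 - es by omega]
        · have hklt : k + 1 ≤ es := by omega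
          have hmem' : ∀ j, (n >>> 1).testBit j = true →
              (k + 1 + j) ∈ ((es, ep) :: rest).map Prod.fst := by
            intro j hj
            have hj' : n.testBit (1 + j) = true := by rw [← hshift j]; exact hj
            have hm := hmem (1 + j) hj'
            rw [show k + (1 + j) = k + 1 + j by omega] at hm
            exact hm
          have hIH := IH (n >>> 1) hrec (k + 1) ((es, ep) :: rest) hsort
            (fun e' he' => ⟨by
                rcases List.mem_cons.mp he' with h | h
                · subst h; exact hklt
                · have := hpair.1 e' h; omega,
              (hent e' he').2⟩)
            hmem'
          rw [hIH]
          apply List.filterMap_congr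
          intro e' he'
          have h1' : k + 1 ≤ e'.1 := by
            rcases List.mem_cons.mp he' with h | h
            · subst h; exact hklt
            · have := hpair.1 e' h; omega
          rw [hshift, show 1 + (e'.1 - (k + 1)) = e'.1 - k by omega]

-- A's per-flag test equals the corresponding bit of B's masked value, for bits inside the mask
lemma pv_bit_iff (flags : Int) (s : Nat) (hs : (1459151 : Nat).testBit s = true) :
    (Int.land flags ((1 <<< s : Nat) : Int) ≠ 0) ↔ ((Int.land flags 1459151).toNat).testBit s = true := by
  cases flags with
  | ofNat f =>
    have h1 : Int.land (Int.ofNat f) ((1 <<< s : Nat) : Int) = Int.ofNat (f &&& (1 <<< s)) := rfl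
    have h2 : (Int.land (Int.ofNat f) (1459151 : Int)).toNat = f &&& 1459151 := rfl
    rw [h1, h2, Nat.testBit_land, hs, Bool.and_true, Nat.one_shiftLeft, Nat.and_two_pow]
    cases hb : f.testBit s <;> simp
  | negSucc f =>
    have h1 : Int.land (Int.negSucc f) ((1 <<< s : Nat) : Int) = Int.ofNat (Nat.ldiff (1 <<< s) f) := rfl
    have h2 : (Int.land (Int.negSucc f) (1459151 : Int)).toNat = Nat.ldiff 1459151 f := rfl
    rw [h1, h2, Nat.testBit_ldiff, hs, Bool.true_and]
    cases hb : f.testBit s with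
    | false =>
      simp only [Bool.not_false, iff_true]
      intro hz
      have hbit : (Nat.ldiff (1 <<< s) f).testBit s = true := by
        rw [Nat.one_shiftLeft, Nat.testBit_ldiff, Nat.testBit_two_pow, hb]
        simp
      rw [show Nat.ldiff (1 <<< s) f = 0 by
        have := congrArg Int.toNat hz
        simpa using this] at hbit
      simp [Nat.zero_testBit] at hbit
    | true =>
      simp only [Bool.not_true, Bool.false_eq_true, iff_false, not_not]
      have hz : Nat.ldiff (1 <<< s) f = 0 := by
        apply Nat.eq_of_testBit_eq
        intro i
        rw [Nat.testBit_ldiff, Nat.one_shiftLeft, Nat.testBit_two_pow, Nat.zero_testBit]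
        by_cases hi : s = i
        · subst hi; simp [hb]
        · simp [hi]
      rw [hz]
      rfl

-- every bit of B's masked value lies inside the mask
lemma pv_mask_bit (flags : Int) (j : Nat) (h : ((Int.land flags 1459151).toNat).testBit j = true) :
    (1459151 : Nat).testBit j = true := by
  cases flags with
  | ofNat f =>
    have h2 : (Int.land (Int.ofNat f) (1459151 : Int)).toNat = f &&& 1459151 := rfl
    rw [h2, Nat.testBit_land] at h
    simp only [Bool.and_eq_true] at h
    exact h.2
  | negSucc f =>
    have h2 : (Int.land (Int.negSucc f) (1459151 : Int)).toNat = Nat.ldiff 1459151 f := rfl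
    rw [h2, Nat.testBit_ldiff] at h
    simp only [Bool.and_eq_true] at h
    exact h.1

lemma pv_main (flags : Int) : calc_flags flags = calc_flags_alt flags := by
  have hmem : ∀ j, ((Int.land flags 1459151).toNat).testBit j = true →
      (0 + j) ∈ pvFlagIndex.map Prod.fst := by
    intro j hj
    have hmask := pv_mask_bit flags j hj
    have hj21 : j < 21 := by
      by_contra hge
      push_neg at hge
      have : (1459151 : Nat) < 2 ^ j :=
        lt_of_lt_of_le (by norm_num) (Nat.pow_le_pow_right (by norm_num) hge)
      rw [Nat.testBit_lt_two_pow this] at hmask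
      exact Bool.false_ne_true hmask
    have hall : ∀ i, i < 21 → (1459151 : Nat).testBit i = true →
        (0 + i) ∈ pvFlagIndex.map Prod.fst := by decide
    exact hall j hj21 hmask
  have hscan := pv_scan_eq ((Int.land flags 1459151).toNat) 0 pvFlagIndex (by decide)
    (by decide) hmem
  have h0 := propext (pv_bit_iff flags 0 (by decide))
  have h1 := propext (pv_bit_iff flags 1 (by decide))
  have h2 := propext (pv_bit_iff flags 2 (by decide))
  have h3 := propext (pv_bit_iff flags 3 (by decide))
  have h6 := propext (pv_bit_iff flags 6 (by decide))
  have h7 := propext (pv_bit_iff flags 7 (by decide))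
  have h8 := propext (pv_bit_iff flags 8 (by decide))
  have h9 := propext (pv_bit_iff flags 9 (by decide))
  have h14 := propext (pv_bit_iff flags 14 (by decide))
  have h17 := propext (pv_bit_iff flags 17 (by decide))
  have h18 := propext (pv_bit_iff flags 18 (by decide))
  have h20 := propext (pv_bit_iff flags 20 (by decide))
  rw [calc_flags_alt, hscan]
  simp only [calc_flags, pvFlagsDictA, pvFlagIndex, List.filterMap_cons, List.filterMap_nil,
    Nat.sub_zero, h0, h1, h2, h3, h6, h7, h8, h9, h14, h17, h18, h20]

-- ===== VERDICT (by name: the statement is the Claim_ definition above) =====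
theorem calc_flags_spec : Claim_equal_calc_flags := by
  intro flags _
  show calc_flags flags = calc_flags_alt flags
  exact pv_main flags
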